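-- pv_equiv track=rewrite | github.com/sagarsv04/DeepLearningIntro | TextSummarizer/vocabulary_embedding.py | get_our_word2glove
-- ===== SOURCE A (Python) =====
-- def get_our_word2glove(glove_index_dict, word2idx):
--
-- 	# lots of word in the full vocabulary (word2idx) are outside vocab_size.
-- 	# Build an alterantive which will map them to their closest match in glove
-- 	# but only if the match is good enough (cos distance above glove_match_threshold)
--
-- 	word2glove = {}
-- 	for word in word2idx:
-- 		# word = "copy"
-- 		if word in glove_index_dict:
-- 			glove_word = word
-- 		elif word.lower() in glove_index_dict:
-- 			glove_word = word.lower()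
-- 		elif word.startswith('#') and word[1:] in glove_index_dict:
-- 			glove_word = word[1:]
-- 		elif word.startswith('#') and word[1:].lower() in glove_index_dict:
-- 			glove_word = word[1:].lower()
-- 		else:
-- 			continue
-- 		word2glove[word] = glove_word
-- 	return word2glove
-- ===== SOURCE B (Python) =====
-- def _sieve(glove_index_dict, cand, remaining):
--     # one pass: split remaining into (word, candidate) hits and still-unmatched words
--     hits, rest = [], []
--     for w in remaining:
--         c = cand(w)
--         if c is not None and c in glove_index_dict:
--             hits.append((w, c))
--         else:
--             rest.append(w)
--     return hits, rest
--
--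
-- def get_our_word2glove(glove_index_dict, word2idx):
--     # Staged sieve: instead of a per-word if/elif cascade, run four passes over a
--     # shrinking list of unmatched words (one pass per candidate transformation),
--     # collect the matches per stage, then reassemble the result in original key order.
--     cands = [
--         lambda w: w,
--         lambda w: w.lower(),
--         lambda w: w[1:] if w.startswith('#') else None,
--         lambda w: w[1:].lower() if w.startswith('#') else None,
--     ]
--     words = list(word2idx)
--     matched = {}
--     remaining = words
--     for cand in cands:
--         hits, remaining = _sieve(glove_index_dict, cand, remaining)
--         matched.update(hits)
--     return {w: matched[w] for w in words if w in matched}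
-- ===== Notes on version B (the rewrite author's own statement) =====
-- stated objective: alternative
-- what changed: Replaces A's per-word four-branch if/elif cascade by four staged sieve passes over a shrinking list of unmatched words (one pass per candidate transformation, matches collected per stage) followed by a reassembly pass in original key order.
import Mathlib
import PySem

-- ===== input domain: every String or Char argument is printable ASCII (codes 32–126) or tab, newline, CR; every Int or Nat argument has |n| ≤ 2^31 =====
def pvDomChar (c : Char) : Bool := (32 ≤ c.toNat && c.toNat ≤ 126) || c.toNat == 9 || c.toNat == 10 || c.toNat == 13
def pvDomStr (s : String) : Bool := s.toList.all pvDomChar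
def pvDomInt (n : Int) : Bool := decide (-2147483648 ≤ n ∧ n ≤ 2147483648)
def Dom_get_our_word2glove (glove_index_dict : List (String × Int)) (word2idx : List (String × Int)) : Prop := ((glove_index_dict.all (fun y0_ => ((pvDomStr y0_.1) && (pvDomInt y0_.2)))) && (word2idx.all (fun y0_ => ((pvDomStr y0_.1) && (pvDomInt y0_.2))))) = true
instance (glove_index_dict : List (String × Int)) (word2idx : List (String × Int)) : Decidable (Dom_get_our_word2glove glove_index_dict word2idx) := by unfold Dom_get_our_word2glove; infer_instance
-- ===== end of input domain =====

-- B replaces A's per-word if/elif cascade by four staged sieve passes over a shrinking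
-- unmatched-word list plus a reassembly pass; alternative decomposition, same cost.


-- ===== PORT A =====
def get_our_word2glove (glove_index_dict : List (String × Int)) (word2idx : List (String × Int)) : List (String × String) :=
  let glove := PySem.Dict.ofList glove_index_dict
  (word2idx.foldl (fun word2glove p =>
      let word := p.1
      if glove.contains word then
        word2glove.insert word word
      else if glove.contains (PySem.Str.lower word) then
        word2glove.insert word (PySem.Str.lower word)
      else if PySem.Str.startswith word "#" && glove.contains (PySem.Str.slice word (some 1) none) then
        word2glove.insert word (PySem.Str.slice word (some 1) none)
      else if PySem.Str.startswith word "#" && glove.contains (PySem.Str.lower (PySem.Str.slice word (some 1) none)) then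
        word2glove.insert word (PySem.Str.lower (PySem.Str.slice word (some 1) none))
      else
        word2glove)
    PySem.Dict.empty).items

-- ===== PORT B =====
-- the four candidate transformations, in stage order (None = stage does not apply)
def pvCands_get_our_word2glove : List (String → Option String) :=
  [fun w => some w,
   fun w => some (PySem.Str.lower w),
   fun w => if PySem.Str.startswith w "#" then some (PySem.Str.slice w (some 1) none) else none,
   fun w => if PySem.Str.startswith w "#" then some (PySem.Str.lower (PySem.Str.slice w (some 1) none)) else none]

-- one sieve pass: split `remaining` into (word, candidate) hits and still-unmatched words
def pvSieve (glove : PySem.Dict String Int) (cand : String → Option String) : List String → List (String × String) × List String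
  | [] => ([], [])
  | w :: r =>
    let (h, t) := pvSieve glove cand r
    match cand w with
    | some c => if glove.contains c then ((w, c) :: h, t) else (h, w :: t)
    | none => (h, w :: t)

def get_our_word2glove_alt (glove_index_dict : List (String × Int)) (word2idx : List (String × Int)) : List (String × String) :=
  let glove := PySem.Dict.ofList glove_index_dict
  let words := word2idx.map Prod.fst
  let st := pvCands_get_our_word2glove.foldl
    (fun (st : PySem.Dict String String × List String) cand =>
      let (hits, rem) := pvSieve glove cand st.2
      (hits.foldl (fun m p => m.insert p.1 p.2) st.1, rem))
    (PySem.Dict.empty, words)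
  (words.foldl (fun d w =>
      match st.1.get? w with
      | some g => d.insert w g
      | none => d)
    PySem.Dict.empty).items

-- ===== PRECONDITION & SPEC =====
def Spec_get_our_word2glove (glove_index_dict : List (String × Int)) (word2idx : List (String × Int)) (out : List (String × String)) : Prop := out = get_our_word2glove_alt glove_index_dict word2idx
instance (glove_index_dict : List (String × Int)) (word2idx : List (String × Int)) (out : List (String × String)) : Decidable (Spec_get_our_word2glove glove_index_dict word2idx out) := by unfold Spec_get_our_word2glove; infer_instance

-- ===== CLAIM (what is proved, stated in full; the proofs are below) =====
def Claim_equal_get_our_word2glove : Prop := ∀ (glove_index_dict : List (String × Int)) (word2idx : List (String × Int)), Dom_get_our_word2glove glove_index_dict word2idx → Spec_get_our_word2glove glove_index_dict word2idx (get_our_word2glove glove_index_dict word2idx)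

-- ===== LEMMAS AND PROOFS =====

-- the first candidate of `cs` (in order) that is a key of `glove`, if any
def pvChoose (glove : PySem.Dict String Int) : List (String → Option String) → String → Option String
  | [], _ => none
  | c :: cs, w =>
    match c w with
    | some x => if glove.contains x then some x else pvChoose glove cs w
    | none => pvChoose glove cs w

-- the common per-word step both programs reduce to
def pvIns (glove : PySem.Dict String Int) (d : PySem.Dict String String) (w : String) : PySem.Dict String String :=
  match pvChoose glove pvCands_get_our_word2glove w with
  | some g => d.insert w g
  | none => d

-- one stage as a named function (the port's loop body, eta-expanded)
def pvStage (glove : PySem.Dict String Int)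
    (st : PySem.Dict String String × List String) (cand : String → Option String) :
    PySem.Dict String String × List String :=
  ((pvSieve glove cand st.2).1.foldl (fun m p => m.insert p.1 p.2) st.1,
   (pvSieve glove cand st.2).2)

lemma pvStage_eq (glove : PySem.Dict String Int) :
    (fun (st : PySem.Dict String String × List String) cand =>
       let (hits, rem) := pvSieve glove cand st.2
       (hits.foldl (fun m p => m.insert p.1 p.2) st.1, rem)) = pvStage glove := by
  funext st cand
  cases h : pvSieve glove cand st.2 with
  | mk hits rem => simp [pvStage, h]

-- sieve characterizations
lemma pvSieve_fst (glove : PySem.Dict String Int) (c : String → Option String) (r : List String) :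
    (pvSieve glove c r).1 = r.filterMap (fun w =>
      match c w with
      | some x => if glove.contains x then some (w, x) else none
      | none => none) := by
  induction r with
  | nil => simp [pvSieve]
  | cons u r ih =>
    cases hu : c u with
    | none => simp [pvSieve, hu, ih]
    | some x => cases hg : glove.contains x <;> simp [pvSieve, hu, hg, ih]

lemma pvSieve_snd (glove : PySem.Dict String Int) (c : String → Option String) (r : List String) :
    (pvSieve glove c r).2 = r.filter (fun w =>
      match c w with
      | some x => !glove.contains x
      | none => true) := by
  induction r with
  | nil => simp [pvSieve]
  | cons u r ih =>
    cases hu : c u with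
    | none => simp [pvSieve, hu, ih]
    | some x => cases hg : glove.contains x <;> simp [pvSieve, hu, hg, ih]

lemma pvSieve_rest_iff (glove : PySem.Dict String Int) (c : String → Option String)
    (r : List String) (w : String) :
    w ∈ (pvSieve glove c r).2 ↔
      w ∈ r ∧ (∀ x, c w = some x → glove.contains x = false) := by
  rw [pvSieve_snd, List.mem_filter]
  cases hc : c w <;> simp

lemma pvSieve_hits_mem (glove : PySem.Dict String Int) (c : String → Option String)
    (r : List String) (p : String × String) (hp : p ∈ (pvSieve glove c r).1) :
    p.1 ∈ r ∧ c p.1 = some p.2 ∧ glove.contains p.2 = true := by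
  rw [pvSieve_fst, List.mem_filterMap] at hp
  rcases hp with ⟨a, ha, hfa⟩
  cases hc : c a with
  | none => rw [hc] at hfa; simp at hfa
  | some x =>
    rw [hc] at hfa
    simp only [] at hfa
    split_ifs at hfa with hg
    · simp only [Option.some.injEq] at hfa
      rw [← hfa]
      exact ⟨ha, hc, hg⟩

lemma pvSieve_mem_hits (glove : PySem.Dict String Int) (c : String → Option String)
    (r : List String) (w x : String) (hw : w ∈ r) (hx : c w = some x)
    (hg : glove.contains x = true) : (w, x) ∈ (pvSieve glove c r).1 := by
  rw [pvSieve_fst, List.mem_filterMap]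
  exact ⟨w, hw, by simp [hx, hg]⟩

-- merging the hits: lookups of an absent key are preserved
lemma pvGet_foldl_insert_not_mem (hits : List (String × String))
    (m : PySem.Dict String String) (w : String) (h : ∀ p ∈ hits, p.1 ≠ w) :
    (hits.foldl (fun m p => m.insert p.1 p.2) m).get? w = m.get? w := by
  induction hits generalizing m with
  | nil => rfl
  | cons p hits ih =>
    simp only [List.foldl_cons]
    rw [ih _ (fun q hq => h q (List.mem_cons_of_mem _ hq))]
    exact PySem.Dict.get?_insert_of_ne _ _ (fun he => h p List.mem_cons_self he.symm)

-- merging the hits: a key whose every hit carries the same value ends with that value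
lemma pvGet_foldl_insert_mem (hits : List (String × String))
    (m : PySem.Dict String String) (w x : String) (hmem : (w, x) ∈ hits)
    (huniq : ∀ p ∈ hits, p.1 = w → p.2 = x) :
    (hits.foldl (fun m p => m.insert p.1 p.2) m).get? w = some x := by
  induction hits generalizing m with
  | nil => cases hmem
  | cons p hits ih =>
    simp only [List.foldl_cons]
    by_cases htail : ∃ q ∈ hits, q.1 = w
    · rcases htail with ⟨q, hq, hqw⟩
      have hqx : q.2 = x := huniq q (List.mem_cons_of_mem _ hq) hqw
      have hmem' : (w, x) ∈ hits := by
        have : q = (w, x) := Prod.ext hqw hqx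
        rwa [this] at hq
      exact ih _ hmem' (fun q hq h => huniq q (List.mem_cons_of_mem _ hq) h)
    · have hp : p = (w, x) := by
        rcases List.mem_cons.mp hmem with h | h
        · exact h.symm
        · exact absurd ⟨_, h, rfl⟩ htail
      subst hp
      rw [pvGet_foldl_insert_not_mem _ _ _ (fun q hq he => htail ⟨q, hq, he⟩)]
      simp [PySem.Dict.get?_insert_self]

-- a word no longer in the remaining list is never touched by later stages
lemma pvProc_get_not_mem (glove : PySem.Dict String Int)
    (cs : List (String → Option String)) (m : PySem.Dict String String)
    (r : List String) (w : String) (hw : w ∉ r) :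
    ((cs.foldl (pvStage glove) (m, r)).1).get? w = m.get? w := by
  induction cs generalizing m r with
  | nil => rfl
  | cons c cs ih =>
    simp only [List.foldl_cons]
    have hrest : w ∉ (pvSieve glove c r).2 := fun h =>
      hw ((pvSieve_rest_iff glove c r w).mp h).1
    rw [show pvStage glove (m, r) c =
        ((pvSieve glove c r).1.foldl (fun m p => m.insert p.1 p.2) m,
         (pvSieve glove c r).2) from rfl]
    rw [ih _ _ hrest]
    exact pvGet_foldl_insert_not_mem _ _ _
      (fun p hp he => hw (he ▸ (pvSieve_hits_mem glove c r p hp).1))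

-- stage invariant: after running the stages, a remaining word's entry is its first match
lemma pvProc_get_mem (glove : PySem.Dict String Int)
    (cs : List (String → Option String)) (m : PySem.Dict String String)
    (r : List String) (w : String) (hw : w ∈ r) :
    ((cs.foldl (pvStage glove) (m, r)).1).get? w =
      match pvChoose glove cs w with
      | some g => some g
      | none => m.get? w := by
  induction cs generalizing m r with
  | nil => simp [pvChoose]
  | cons c cs ih =>
    simp only [List.foldl_cons]
    rw [show pvStage glove (m, r) c =
        ((pvSieve glove c r).1.foldl (fun m p => m.insert p.1 p.2) m,
         (pvSieve glove c r).2) from rfl]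
    cases hc : c w with
    | none =>
      have hrest : w ∈ (pvSieve glove c r).2 :=
        (pvSieve_rest_iff glove c r w).mpr ⟨hw, fun x hx => by rw [hc] at hx; cases hx⟩
      rw [ih _ _ hrest,
        pvGet_foldl_insert_not_mem _ _ _ (fun p hp he => by
          have := (pvSieve_hits_mem glove c r p hp).2.1
          rw [he, hc] at this; cases this)]
      simp [pvChoose, hc]
    | some x =>
      cases hg : glove.contains x with
      | true =>
        have hrest : w ∉ (pvSieve glove c r).2 := fun h => by
          have := ((pvSieve_rest_iff glove c r w).mp h).2 x hc
          rw [hg] at this; cases this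
        rw [pvProc_get_not_mem glove cs _ _ w hrest]
        rw [pvGet_foldl_insert_mem _ _ w x (pvSieve_mem_hits glove c r w x hw hc hg)
          (fun p hp he => by
            have := (pvSieve_hits_mem glove c r p hp).2.1
            rw [he, hc] at this; injection this with h; exact h.symm)]
        simp [pvChoose, hc, hg]
      | false =>
        have hrest : w ∈ (pvSieve glove c r).2 :=
          (pvSieve_rest_iff glove c r w).mpr
            ⟨hw, fun y hy => by rw [hc] at hy; injection hy with h; rwa [← h]⟩
        rw [ih _ _ hrest,
          pvGet_foldl_insert_not_mem _ _ _ (fun p hp he => by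
            rcases pvSieve_hits_mem glove c r p hp with ⟨_, h1, h2⟩
            rw [he, hc] at h1; injection h1 with h1
            rw [← h1, hg] at h2; cases h2)]
        simp [pvChoose, hc, hg]

-- A's four-branch cascade is the choose-then-insert step
lemma pvStepA_eq (glove : PySem.Dict String Int) (d : PySem.Dict String String) (word : String) :
    (if glove.contains word then
        d.insert word word
      else if glove.contains (PySem.Str.lower word) then
        d.insert word (PySem.Str.lower word)
      else if PySem.Str.startswith word "#" && glove.contains (PySem.Str.slice word (some 1) none) then
        d.insert word (PySem.Str.slice word (some 1) none)
      else if PySem.Str.startswith word "#" && glove.contains (PySem.Str.lower (PySem.Str.slice word (some 1) none)) then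
        d.insert word (PySem.Str.lower (PySem.Str.slice word (some 1) none))
      else d)
    = pvIns glove d word := by
  unfold pvIns pvChoose pvCands_get_our_word2glove
  cases h1 : glove.contains word <;>
  cases h2 : glove.contains (PySem.Str.lower word) <;>
  cases h3 : PySem.Chars.startswith word.toList ['#'] <;>
  cases h4 : glove.contains (PySem.Str.slice word (some 1) none) <;>
  cases h5 : glove.contains (PySem.Str.lower (PySem.Str.slice word (some 1) none)) <;>
  simp [pvChoose, h1, h2, h3, h4, h5]

-- B's reassembly step is the same step, for words of the original list
lemma pvStepB_eq (glove : PySem.Dict String Int) (words : List String)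
    (d : PySem.Dict String String) (w : String) (hw : w ∈ words) :
    (match ((pvCands_get_our_word2glove.foldl (pvStage glove)
        (PySem.Dict.empty, words)).1).get? w with
     | some g => d.insert w g
     | none => d) = pvIns glove d w := by
  rw [pvProc_get_mem glove _ _ _ w hw]
  unfold pvIns
  cases h : pvChoose glove pvCands_get_our_word2glove w with
  | none => simp [PySem.Dict.get?_empty]
  | some g => simp

-- ===== VERDICT (by name: the statement is the Claim_ definition above) =====
theorem get_our_word2glove_spec : Claim_equal_get_our_word2glove := by
  intro glove_index_dict word2idx _
  unfold Spec_get_our_word2glove get_our_word2glove get_our_word2glove_alt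
  simp only [pvStage_eq]
  refine congrArg PySem.Dict.items ?_
  refine Eq.trans (PySem.List.foldl_congr_mem word2idx _
    (fun acc (x : String × Int) => pvIns (PySem.Dict.ofList glove_index_dict) acc x.1)
    PySem.Dict.empty
    (fun acc x _ => pvStepA_eq (PySem.Dict.ofList glove_index_dict) acc x.1)) ?_
  refine Eq.trans ?_ (PySem.List.foldl_congr_mem (word2idx.map Prod.fst) _
    (fun acc w => pvIns (PySem.Dict.ofList glove_index_dict) acc w)
    PySem.Dict.empty
    (fun acc w hw => pvStepB_eq (PySem.Dict.ofList glove_index_dict) (word2idx.map Prod.fst) acc w hw)).symm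
  exact List.foldl_map.symm
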